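-- pv_equiv track=rewrite | github.com/christofhaerens/advent_of_code | 2020/14/solve.py | addr_mask
-- ===== SOURCE A (Python) =====
-- def n2bits(n, bitsize):
--     b = ""
--     for i in range(bitsize):
--         x = pow(2, i)
--         if x == x & n:
--             b = "1" + b
--         else:
--             b = "0" + b
--     return b
--
-- def addr_mask(mask, addr):
--     addr = n2bits(addr, len(mask))  # transform addr to bitstring
--     addr_mask = ""
--     for i, b in enumerate(mask):
--         if b in "X1":
--             addr_mask += b
--         else:
--             addr_mask += addr[i]
--     return addr_mask
-- ===== SOURCE B (Python) =====
-- def addr_mask(mask, addr):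
--     L = len(mask)
--     out = []
--     for i in range(L):
--         c = mask[i]
--         if c == 'X' or c == '1':
--             out.append(c)
--         else:
--             out.append(str((addr >> (L - 1 - i)) & 1))
--     return "".join(out)
-- ===== Notes on version B (the rewrite author's own statement) =====
-- stated objective: faster
-- what changed: Dropped the n2bits helper: instead of first building a full len(mask)-bit big-endian bitstring of addr and then indexing into it, B makes one pass over mask and extracts each needed address bit on demand with a shift and a mask ((addr >> (len-1-i)) & 1), collecting pieces in a list joined once.
import Mathlib
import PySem

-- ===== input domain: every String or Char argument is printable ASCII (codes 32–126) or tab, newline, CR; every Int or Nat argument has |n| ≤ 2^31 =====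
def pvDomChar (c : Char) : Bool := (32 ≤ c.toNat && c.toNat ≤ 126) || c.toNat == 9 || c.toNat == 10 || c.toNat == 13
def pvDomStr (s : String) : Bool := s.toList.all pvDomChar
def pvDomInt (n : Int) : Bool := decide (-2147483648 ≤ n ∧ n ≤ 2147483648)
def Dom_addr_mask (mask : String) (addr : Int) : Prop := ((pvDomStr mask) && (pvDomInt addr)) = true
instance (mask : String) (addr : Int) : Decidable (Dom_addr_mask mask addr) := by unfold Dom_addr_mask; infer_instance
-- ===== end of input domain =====

-- B fuses A's two passes: it drops the n2bits helper and extracts each address bit on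
-- demand with a shift-and-mask during a single pass over mask (same return value).


-- ===== PORT A =====
-- helper n2bits: builds the big-endian bitstring of n (low bit tested with pow(2,i) & n,
-- prepended, exactly as the Python loop does); strings are ported as List Char.
def n2bits (n : Int) (bitsize : Nat) : List Char :=
  (List.range bitsize).foldl (fun b i =>
    let x : Int := 2 ^ i
    if x = PySem.Int.band x n then '1' :: b else '0' :: b) []

def addr_mask (mask : String) (addr : Int) : String :=
  let a := n2bits addr mask.toList.length
  -- addr[p.1] is always in range (n2bits returns len(mask) chars), so the pyGetD default is never used
  String.mk ((PySem.List.enumerate mask.toList).foldl (fun am p =>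
      if p.2 = 'X' ∨ p.2 = '1' then am ++ [p.2]
      else am ++ [PySem.List.pyGetD a p.1 ' ']) [])

-- ===== PORT B =====
def addr_mask_alt (mask : String) (addr : Int) : String :=
  let L := mask.toList.length
  -- mask[i] is always in range for i < L, so the getD default is never used
  String.mk ((List.range L).foldl (fun out i =>
      let c := mask.toList.getD i ' '
      if c = 'X' ∨ c = '1' then out ++ [c]
      else out ++ PySem.Int.toChars (PySem.Int.band (addr >>> (L - 1 - i)) 1)) [])

-- ===== PRECONDITION & SPEC =====
def Spec_addr_mask (mask : String) (addr : Int) (out : String) : Prop := out = addr_mask_alt mask addr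
instance (mask : String) (addr : Int) (out : String) : Decidable (Spec_addr_mask mask addr out) := by unfold Spec_addr_mask; infer_instance

-- ===== CLAIM (what is proved, stated in full; the proofs are below) =====
def Claim_equal_addr_mask : Prop := ∀ (mask : String) (addr : Int), Dom_addr_mask mask addr → Spec_addr_mask mask addr (addr_mask mask addr)

-- ===== LEMMAS AND PROOFS =====

-- the character A's n2bits stores for bit j
def bitc (n : Int) (j : Nat) : Char := if (2:Int)^j = PySem.Int.band ((2:Int)^j) n then '1' else '0'

theorem n2bits_eq (n : Int) (L : Nat) :
    n2bits n L = ((List.range L).reverse).map (bitc n) := by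
  induction L with
  | zero => rfl
  | succ L ih =>
    have step : n2bits n (L+1) = bitc n L :: n2bits n L := by
      simp only [n2bits, List.range_succ, List.foldl_append, List.foldl_cons, List.foldl_nil, bitc]
      split <;> rfl
    rw [step, ih, List.range_succ]
    simp

theorem bit_char (n : Int) (j : Nat) :
    PySem.Int.toChars (PySem.Int.band (n >>> j) 1) = [bitc n j] := by
  rw [PySem.Int.band_one]
  cases n with
  | ofNat m =>
    rw [Int.ofNat_eq_natCast, ← Int.natCast_shiftRight,
      PySem.Int.mod_eq_emod_of_pos (by norm_num)]
    have hv : ((m >>> j : Nat) : Int) % 2 = ((m / 2 ^ j % 2 : Nat) : Int) := by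
      rw [Nat.shiftRight_eq_div_pow]; push_cast; omega
    have hb : PySem.Int.band ((2:Int)^j) (m : Int) = ((2^j &&& m : Nat) : Int) := by
      have h := PySem.Int.band_natCast (2^j) m
      push_cast at h ⊢
      exact h
    unfold bitc
    rw [hv, hb, Nat.two_pow_and, Nat.testBit_eq_decide_div_mod_eq]
    rcases Nat.mod_two_eq_zero_or_one (m / 2 ^ j) with h | h
    · rw [h]
      have hp : (0:Nat) < 2^j := Nat.two_pow_pos j
      rw [if_neg (by simp)]
      decide
    · rw [h]
      rw [if_pos (by norm_num)]
      decide
  | negSucc m =>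
    have hs : (Int.negSucc m) >>> j = Int.negSucc (m >>> j) := by
      simp [Int.shiftRight_eq, Int.shiftRight]
    rw [hs, PySem.Int.mod_eq_emod_of_pos (by norm_num)]
    have hneg : Int.negSucc (m >>> j) = -(((m / 2 ^ j : Nat) : Int) + 1) := by
      rw [Int.negSucc_eq, Nat.shiftRight_eq_div_pow]
    have hb : PySem.Int.band ((2:Int)^j) (Int.negSucc m) = ((2^j - (2^j &&& m) : Nat) : Int) := by
      have h1 : ((0:Int) ≤ (2:Int)^j) := by positivity
      have h2 : ¬ ((0:Int) ≤ Int.negSucc m) := by rw [Int.negSucc_eq]; omega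
      simp only [PySem.Int.band, if_pos h1, if_neg h2]
      have h3 : (-(Int.negSucc m) - 1) = (m : Int) := by rw [Int.negSucc_eq]; ring
      have e1 : ((2:Int)^j).toNat = 2^j := by
        rw [show ((2:Int)^j) = ((2^j : Nat) : Int) by push_cast; ring, Int.toNat_natCast]
      rw [h3, e1, Int.toNat_natCast]
    unfold bitc
    rw [hneg, hb, Nat.two_pow_and, Nat.testBit_eq_decide_div_mod_eq]
    have hp : (0:Nat) < 2^j := Nat.two_pow_pos j
    have hc : (((m / 2 ^ j : Nat) : Int)) % 2 = ((m / 2 ^ j % 2 : Nat) : Int) := by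
      push_cast; omega
    rcases Nat.mod_two_eq_zero_or_one (m / 2 ^ j) with h | h
    · rw [h]
      have hv : -(((m / 2 ^ j : Nat) : Int) + 1) % 2 = 1 := by
        rw [h] at hc; push_cast at hc; omega
      rw [hv, if_pos (by simp)]
      decide
    · rw [h]
      have hv : -(((m / 2 ^ j : Nat) : Int) + 1) % 2 = 0 := by
        rw [h] at hc; push_cast at hc; omega
      rw [hv, if_neg (by simp)]
      decide

theorem foldl_ite_append {α β : Type} (P : α → Prop) [DecidablePred P] (u v : α → List β)
    (l : List α) (acc : List β) :
    List.foldl (fun am x => if P x then am ++ u x else am ++ v x) acc l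
      = acc ++ l.flatMap (fun x => if P x then u x else v x) := by
  have h : (fun (am : List β) x => if P x then am ++ u x else am ++ v x)
      = fun am x => am ++ (if P x then u x else v x) := by
    funext am x; split <;> rfl
  rw [h, PySem.List.foldl_append_eq_flatMap]

theorem addr_mask_spec : Claim_equal_addr_mask := by
  intro mask addr _
  unfold Spec_addr_mask
  simp only [addr_mask, addr_mask_alt]
  congr 1
  rw [PySem.List.enumerate_eq_map_pyRange mask.toList ' ']
  simp only [PySem.List.len]
  rw [PySem.List.pyRange_zero_natCast, List.foldl_map]
  rw [foldl_ite_append, foldl_ite_append]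
  rw [List.flatMap_map]
  refine congrArg _ (List.flatMap_congr ?_)
  intro i hi
  have hiL : i < mask.toList.length := List.mem_range.mp hi
  simp only [PySem.List.pyGetD_natCast]
  rw [n2bits_eq]
  have hlen : (((List.range mask.toList.length).reverse).map (bitc addr)).length
      = mask.toList.length := by simp
  have hget : (((List.range mask.toList.length).reverse).map (bitc addr)).getD i ' '
      = bitc addr (mask.toList.length - 1 - i) := by
    rw [List.getD_eq_getElem _ _ (by rw [hlen]; exact hiL)]
    simp [List.getElem_reverse]
  rw [hget, ← bit_char]
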